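-- pv_equiv track=rewrite | github.com/navyasraj02/Moodle-Agentic-Assistant | app/agents.py | _pick_best_assignment
-- ===== SOURCE A (Python) =====
-- def _pick_best_assignment(assignments: list[dict]) -> dict | None:
--     """Pick the best open assignment: nearest due date, or first open."""
--     open_ones = [a for a in assignments if a.get("status") == "open"]
--     if not open_ones:
--         return None
--     # Prefer ones with a due date (sorted by due_date string — Moodle dates sort OK)
--     with_due = [a for a in open_ones if a.get("due_date")]
--     if with_due:
--         return with_due[0]
--     return open_ones[0]
-- ===== SOURCE B (Python) =====
-- def _pick_best_assignment(assignments: list[dict]) -> dict | None: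
--     """Pick the best open assignment by scoring each one (0 = open with a due
--     date, 1 = open, 2 = not open) and taking the stable minimum."""
--     def _rank(a):
--         if a.get("status") != "open":
--             return 2
--         return 0 if a.get("due_date") else 1
--     best = min(assignments, key=_rank, default=None)
--     if best is None or _rank(best) == 2:
--         return None
--     return best
-- ===== Notes on version B (the rewrite author's own statement) =====
-- stated objective: alternative
-- what changed: Replaces A's staged filter-then-index selection with a scoring function (0 = open with due date, 1 = open, 2 = not open) and a single stable min-by-key over the list, returning None when the minimum score is 2.
import Mathlib
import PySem

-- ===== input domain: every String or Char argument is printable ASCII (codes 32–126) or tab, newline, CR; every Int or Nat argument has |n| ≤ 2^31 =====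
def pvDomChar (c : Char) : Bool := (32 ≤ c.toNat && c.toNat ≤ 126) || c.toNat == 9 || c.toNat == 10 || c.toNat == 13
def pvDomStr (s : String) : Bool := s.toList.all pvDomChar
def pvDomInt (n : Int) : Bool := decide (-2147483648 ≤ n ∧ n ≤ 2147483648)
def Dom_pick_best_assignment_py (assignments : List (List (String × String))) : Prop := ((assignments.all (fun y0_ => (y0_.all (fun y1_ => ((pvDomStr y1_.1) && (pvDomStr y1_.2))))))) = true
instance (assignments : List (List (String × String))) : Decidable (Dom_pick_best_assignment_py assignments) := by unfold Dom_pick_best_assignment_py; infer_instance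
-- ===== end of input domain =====

-- B replaces A's staged filter-then-index selection by a scoring function and one stable min-by-key (objective: alternative).

-- a.get(k): first-match lookup in the association list (exact for dict.get under the type convention)
def pvGet (a : List (String × String)) (k : String) : Option String :=
  (a.find? (fun p => p.1 == k)).map (·.2)

-- truthiness of a.get("due_date"): missing key (None) and "" are falsy
def pvTruthy (o : Option String) : Bool := o.getD "" != ""

-- ===== PORT A =====
def pick_best_assignment_py (assignments : List (List (String × String))) : Option (List (String × String)) :=
  let open_ones := assignments.filter (fun a => pvGet a "status" == some "open")
  if open_ones.isEmpty then none
  else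
    let with_due := open_ones.filter (fun a => pvTruthy (pvGet a "due_date"))
    if !with_due.isEmpty then with_due.head? else open_ones.head?

-- ===== PORT B =====
-- Source B's _rank: 2 if not open, else 0 with a truthy due_date, else 1
def pvRank (a : List (String × String)) : Nat :=
  if !(pvGet a "status" == some "open") then 2
  else if pvTruthy (pvGet a "due_date") then 0 else 1

-- min(assignments, key=_rank, default=None) is PySem.List.min? (first extremal element)
def pick_best_assignment_py_alt (assignments : List (List (String × String))) : Option (List (String × String)) :=
  match PySem.List.min? assignments pvRank with
  | none => none
  | some best => if pvRank best == 2 then none else some best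

-- ===== PRECONDITION & SPEC =====
def Spec_pick_best_assignment_py (assignments : List (List (String × String))) (out : Option (List (String × String))) : Prop := out = pick_best_assignment_py_alt assignments
instance (assignments : List (List (String × String))) (out : Option (List (String × String))) : Decidable (Spec_pick_best_assignment_py assignments out) := by unfold Spec_pick_best_assignment_py; infer_instance

-- ===== CLAIM (what is proved, stated in full; the proofs are below) =====
def Claim_equal_pick_best_assignment_py : Prop := ∀ (assignments : List (List (String × String))), Dom_pick_best_assignment_py assignments → Spec_pick_best_assignment_py assignments (pick_best_assignment_py assignments)

-- ===== LEMMAS AND PROOFS =====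

-- every rank is 0, 1 or 2
theorem pvRank_cases (a : List (String × String)) :
    pvRank a = 0 ∨ pvRank a = 1 ∨ pvRank a = 2 := by
  unfold pvRank; split_ifs <;> simp

-- one step of the min?-fold: the accumulator survives unless strictly beaten
theorem min?_step (a m : List (String × String)) (l : List (List (String × String))) :
    PySem.List.min? (m :: a :: l) pvRank
      = PySem.List.min? ((if pvRank a < pvRank m then a else m) :: l) pvRank := by
  by_cases h : pvRank a < pvRank m <;> simp [PySem.List.min?, h]

-- the min?-fold started from accumulator m: the first rank-0 element of the rest
-- wins, else the first rank-1 element if it beats m, else m itself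
theorem min?_fold_rank (l : List (List (String × String))) (m : List (String × String)) :
    PySem.List.min? (m :: l) pvRank =
    ((l.filter (fun a => decide (pvRank a < pvRank m) && (pvRank a == 0))).head?).or
      (((l.filter (fun a => decide (pvRank a < pvRank m) && (pvRank a == 1))).head?).or (some m)) := by
  have e1 : (fun x : List (String × String) => decide (pvRank x = 0) && (pvRank x == 0))
      = (fun x => pvRank x == 0) := by
    funext x; rcases pvRank_cases x with h | h | h <;> simp [h]
  have e2 : (fun x : List (String × String) => decide (pvRank x ≤ 1) && (pvRank x == 0))
      = (fun x => pvRank x == 0) := by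
    funext x; rcases pvRank_cases x with h | h | h <;> simp [h]
  have e3 : (fun x : List (String × String) => decide (pvRank x = 0) && (pvRank x == 1))
      = (fun _ => false) := by
    funext x; rcases pvRank_cases x with h | h | h <;> simp [h]
  induction l generalizing m with
  | nil => simp [PySem.List.min?]
  | cons a l ih =>
    rw [min?_step]
    by_cases h : pvRank a < pvRank m
    · rcases pvRank_cases a with ha | ha | ha <;>
        rcases pvRank_cases m with hm | hm | hm <;>
          simp [ha, hm, ih, Option.or, e1, e2, e3] at *
    · rcases pvRank_cases a with ha | ha | ha <;>
        rcases pvRank_cases m with hm | hm | hm <;>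
          simp [ha, hm, ih, Option.or, e1, e2, e3] at *

-- min? with key pvRank returns the first rank-0 element, else the first rank-1
-- element, else the first element (everything then has rank 2)
theorem min?_rank_eq (l : List (List (String × String))) :
    PySem.List.min? l pvRank =
      ((l.filter (fun a => pvRank a == 0)).head?).or
        (((l.filter (fun a => pvRank a == 1)).head?).or l.head?) := by
  have e1 : (fun x : List (String × String) => decide (pvRank x = 0) && (pvRank x == 0))
      = (fun x => pvRank x == 0) := by
    funext x; rcases pvRank_cases x with h | h | h <;> simp [h]
  have e2 : (fun x : List (String × String) => decide (pvRank x ≤ 1) && (pvRank x == 0))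
      = (fun x => pvRank x == 0) := by
    funext x; rcases pvRank_cases x with h | h | h <;> simp [h]
  have e3 : (fun x : List (String × String) => decide (pvRank x = 0) && (pvRank x == 1))
      = (fun _ => false) := by
    funext x; rcases pvRank_cases x with h | h | h <;> simp [h]
  have e4 : (fun x : List (String × String) => decide (pvRank x ≤ 1) && (pvRank x == 1))
      = (fun x => pvRank x == 1) := by
    funext x; rcases pvRank_cases x with h | h | h <;> simp [h]
  cases l with
  | nil => simp [PySem.List.min?]
  | cons a l =>
    rw [min?_fold_rank]
    rcases pvRank_cases a with ha | ha | ha <;>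
      simp [ha, Option.or, e1, e2, e3, e4] <;>
      cases List.find? (fun a => pvRank a == 0) l <;>
      cases List.find? (fun a => pvRank a == 1) l <;> simp

-- A's open-status test is exactly "rank ≠ 2"
theorem eOpen : (fun a : List (String × String) => pvGet a "status" == some "open")
    = (fun a => !(pvRank a == 2)) := by
  funext x; unfold pvRank; split_ifs with h1 h2 <;> simp_all

-- ===== VERDICT (by name: the statement is the Claim_ definition above) =====
theorem pick_best_assignment_py_spec : Claim_equal_pick_best_assignment_py := by
  intro l _
  unfold Spec_pick_best_assignment_py
  simp only [pick_best_assignment_py, pick_best_assignment_py_alt]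
  rw [min?_rank_eq, eOpen]
  have hdue : (l.filter (fun a => !(pvRank a == 2))).filter (fun a => pvTruthy (pvGet a "due_date"))
      = l.filter (fun a => pvRank a == 0) := by
    rw [List.filter_filter]
    apply List.filter_congr
    intro x _
    unfold pvRank; split_ifs with h1 h2 <;> simp_all
  rw [hdue]
  rcases h0 : l.filter (fun a => pvRank a == 0) with _ | ⟨x0, t0⟩
  · rcases h1 : l.filter (fun a => pvRank a == 1) with _ | ⟨x1, t1⟩
    · have hall0 := List.filter_eq_nil_iff.mp h0
      have hall1 := List.filter_eq_nil_iff.mp h1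
      have hopen : l.filter (fun a => !(pvRank a == 2)) = [] := by
        apply List.filter_eq_nil_iff.mpr
        intro x hx
        rcases pvRank_cases x with h | h | h
        · exact absurd (by simp [h]) (hall0 x hx)
        · exact absurd (by simp [h]) (hall1 x hx)
        · simp [h]
      rw [hopen]
      cases l with
      | nil => simp
      | cons a t =>
        have : pvRank a = 2 := by
          rcases pvRank_cases a with h | h | h
          · exact absurd (by simp [h]) (hall0 a (by simp))
          · exact absurd (by simp [h]) (hall1 a (by simp))
          · exact h
        simp [Option.or, this]
    · have hall0 := List.filter_eq_nil_iff.mp h0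
      have hopen : l.filter (fun a => !(pvRank a == 2)) = l.filter (fun a => pvRank a == 1) := by
        apply List.filter_congr
        intro x hx
        rcases pvRank_cases x with h | h | h
        · exact absurd (by simp [h]) (hall0 x hx)
        · simp [h]
        · simp [h]
      have hr1 : pvRank x1 = 1 := by
        have : x1 ∈ l.filter (fun a => pvRank a == 1) := by rw [h1]; simp
        simpa using (List.mem_filter.mp this).2
      rw [hopen, h1]
      simp [Option.or, hr1]
  · have hr0 : pvRank x0 = 0 := by
      have : x0 ∈ l.filter (fun a => pvRank a == 0) := by rw [h0]; simp
      simpa using (List.mem_filter.mp this).2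
    have hne : l.filter (fun a => !(pvRank a == 2)) ≠ [] := by
      intro hnil
      have := List.filter_eq_nil_iff.mp hnil x0
        (List.mem_of_mem_filter (by rw [h0]; simp : x0 ∈ l.filter (fun a => pvRank a == 0)))
      simp [hr0] at this
    rcases hO : l.filter (fun a => !(pvRank a == 2)) with _ | ⟨y, t⟩
    · exact absurd hO hne
    · simp [Option.or, hr0]
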